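-- pv_equiv track=rewrite | github.com/Bohndiggin/storymaster | scripts/import_world_building.py | update_foreign_keys
-- ===== SOURCE A (Python) =====
-- def update_foreign_keys(row_data: dict, id_mapping: dict, current_table: str) -> dict:
--     """Update foreign key references using ID mapping"""
--     updated_data = row_data.copy()
--
--     # Common foreign key patterns
--     fk_patterns = {
--         "actor_id": "actor",
--         "faction_id": "faction",
--         "location_id": "location_",
--         "race_id": "race",
--         "sub_race_id": "sub_race",
--         "parent_race_id": "race",
--         "class_id": "class",
--         "skill_id": "skills",
--         "stat_id": "stat",
--         "background_id": "background",
--         "alignment_id": "alignment",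
--         "history_id": "history",
--         "object_id": "object_",
--         "world_data_id": "world_data",
--         "arc_type_id": "arc_type",
--     }
--
--     for fk_field, ref_table in fk_patterns.items():
--         if fk_field in updated_data and updated_data[fk_field] is not None:
--             original_fk_id = updated_data[fk_field]
--             if ref_table in id_mapping and original_fk_id in id_mapping[ref_table]:
--                 updated_data[fk_field] = id_mapping[ref_table][original_fk_id]
--
--     return updated_data
-- ===== SOURCE B (Python) =====
-- _IRREGULAR = {
--     "location_id": "location_",
--     "parent_race_id": "race",
--     "skill_id": "skills",
--     "object_id": "object_",
-- }
--
-- _FK_FIELDS = frozenset([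
--     "actor_id", "faction_id", "location_id", "race_id", "sub_race_id",
--     "parent_race_id", "class_id", "skill_id", "stat_id", "background_id",
--     "alignment_id", "history_id", "object_id", "world_data_id", "arc_type_id",
-- ])
--
--
-- def _ref_table(key):
--     """Referenced table for a foreign-key field: strip the '_id' suffix,
--     with a small table of irregular names; None for non-fk fields."""
--     if key in _FK_FIELDS:
--         return _IRREGULAR.get(key, key[:-3])
--     return None
--
--
-- def update_foreign_keys(row_data: dict, id_mapping: dict, current_table: str) -> dict:
--     """Update foreign key references using ID mapping"""
--     updated = {}
--     for key, value in row_data.items():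
--         table = _ref_table(key)
--         if value is not None and table is not None and table in id_mapping:
--             updated[key] = id_mapping[table].get(value, value)
--         else:
--             updated[key] = value
--     return updated
-- ===== Notes on version B (the rewrite author's own statement) =====
-- stated objective: idiomatic
-- what changed: B loops over the row's own entries building a fresh result dict, deriving each referenced table by stripping the '_id' suffix (with a 4-entry irregular-name table) and checking membership in a frozenset of fk fields, instead of A's loop over a fixed 15-pair pattern dict mutating a copy of the row; Pre_ excludes association lists with duplicate row keys, which no Python dict input can represent and on which A's overwrite semantics and B's per-entry pass accidentally differ.
import Mathlib
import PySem

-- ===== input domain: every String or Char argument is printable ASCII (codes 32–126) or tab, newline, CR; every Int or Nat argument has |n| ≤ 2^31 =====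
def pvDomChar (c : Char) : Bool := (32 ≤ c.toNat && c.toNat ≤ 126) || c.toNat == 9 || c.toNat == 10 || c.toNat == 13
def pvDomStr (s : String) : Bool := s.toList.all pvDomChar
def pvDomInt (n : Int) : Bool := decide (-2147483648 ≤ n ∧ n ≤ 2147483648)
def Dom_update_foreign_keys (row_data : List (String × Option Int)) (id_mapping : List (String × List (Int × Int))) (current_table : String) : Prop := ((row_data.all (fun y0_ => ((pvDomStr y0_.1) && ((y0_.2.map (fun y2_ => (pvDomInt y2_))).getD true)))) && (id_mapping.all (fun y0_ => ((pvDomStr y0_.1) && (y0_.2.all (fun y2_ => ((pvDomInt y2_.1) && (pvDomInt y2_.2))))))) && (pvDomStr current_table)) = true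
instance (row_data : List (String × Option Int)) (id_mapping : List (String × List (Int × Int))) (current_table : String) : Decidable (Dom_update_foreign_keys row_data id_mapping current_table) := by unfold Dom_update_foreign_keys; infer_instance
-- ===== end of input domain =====

-- B builds a fresh result dict in one pass over the row's own entries, deriving each referenced table
-- by stripping the "_id" suffix (plus a 4-entry irregular-name table) instead of A's loop over a
-- fixed 15-pair pattern dict mutating a copy of the row; objective: idiomatic.

-- ===== PORT A =====
def fkPatternsA : List (String × String) :=
  [("actor_id", "actor"), ("faction_id", "faction"), ("location_id", "location_"),
   ("race_id", "race"), ("sub_race_id", "sub_race"), ("parent_race_id", "race"),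
   ("class_id", "class"), ("skill_id", "skills"), ("stat_id", "stat"),
   ("background_id", "background"), ("alignment_id", "alignment"), ("history_id", "history"),
   ("object_id", "object_"), ("world_data_id", "world_data"), ("arc_type_id", "arc_type")]

-- one iteration of A's `for fk_field, ref_table in fk_patterns.items()` loop body
def fkStep (idm : PySem.Dict String (List (Int × Int))) (u : PySem.Dict String (Option Int))
    (p : String × String) : PySem.Dict String (Option Int) :=
  match u.get? p.1 with                      -- `fk_field in updated_data and updated_data[fk_field] is not None`
  | some (some x) =>
    match idm.get? p.2 with                  -- `ref_table in id_mapping`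
    | some table =>
      match (PySem.Dict.mk table).get? x with  -- `original_fk_id in id_mapping[ref_table]`
      | some nv => u.insert p.1 (some nv)    -- `updated_data[fk_field] = id_mapping[ref_table][original_fk_id]`
      | none => u
    | none => u
  | _ => u

def update_foreign_keys (row_data : List (String × Option Int)) (id_mapping : List (String × List (Int × Int))) (current_table : String) : List (String × Option Int) :=
  (fkPatternsA.foldl (fkStep (PySem.Dict.mk id_mapping)) (PySem.Dict.mk row_data)).items

-- ===== PORT B =====
-- Source B's _IRREGULAR dict
def fkIrregular : PySem.Dict String String :=
  PySem.Dict.mk [("location_id", "location_"), ("parent_race_id", "race"),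
                 ("skill_id", "skills"), ("object_id", "object_")]

-- Source B's _FK_FIELDS frozenset
def fkFieldSet : PySem.Set String :=
  PySem.Set.ofList
    ["actor_id", "faction_id", "location_id", "race_id", "sub_race_id",
     "parent_race_id", "class_id", "skill_id", "stat_id", "background_id",
     "alignment_id", "history_id", "object_id", "world_data_id", "arc_type_id"]

-- Source B's _ref_table(key): suffix strip with irregular names, None for non-fk fields
def refTableOf (key : String) : Option String :=
  if fkFieldSet.contains key then
    some ((fkIrregular.get? key).getD (PySem.Str.slice key none (some (-3))))
  else none

-- Source B's loop body: the value written into `updated` for one row entry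
def bEntry (idm : PySem.Dict String (List (Int × Int))) (key : String) (value : Option Int) : Option Int :=
  match value with                                    -- `value is not None`
  | some v =>
    match refTableOf key with                         -- `table is not None`
    | some t =>
      match idm.get? t with                           -- `table in id_mapping`
      | some m => some ((PySem.Dict.mk m).getD v v)   -- id_mapping[table].get(value, value)
      | none => value
    | none => value
  | none => value

def update_foreign_keys_alt (row_data : List (String × Option Int)) (id_mapping : List (String × List (Int × Int))) (current_table : String) : List (String × Option Int) :=
  (row_data.foldl
    (fun (updated : PySem.Dict String (Option Int)) kv =>
      updated.insert kv.1 (bEntry (PySem.Dict.mk id_mapping) kv.1 kv.2))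
    PySem.Dict.empty).items

-- ===== PRECONDITION & SPEC =====
-- Pre_ excludes association lists whose row keys repeat: no Python dict argument can represent them,
-- and A's first-occurrence read with overwrite-all insert versus B's per-entry pass differ only there.
def Pre_update_foreign_keys (row_data : List (String × Option Int)) (id_mapping : List (String × List (Int × Int))) (current_table : String) : Prop :=
  (row_data.map Prod.fst).Nodup
instance (row_data : List (String × Option Int)) (id_mapping : List (String × List (Int × Int))) (current_table : String) : Decidable (Pre_update_foreign_keys row_data id_mapping current_table) := by unfold Pre_update_foreign_keys; infer_instance

def pvWitness_update_foreign_keys : (List (String × Option Int)) × (List (String × List (Int × Int))) × String :=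
  ([("actor_id", some 1), ("name", none), ("x", some 3)], [("actor", [(1, 10)])], "actor")

def Spec_update_foreign_keys (row_data : List (String × Option Int)) (id_mapping : List (String × List (Int × Int))) (current_table : String) (out : List (String × Option Int)) : Prop := out = update_foreign_keys_alt row_data id_mapping current_table
instance (row_data : List (String × Option Int)) (id_mapping : List (String × List (Int × Int))) (current_table : String) (out : List (String × Option Int)) : Decidable (Spec_update_foreign_keys row_data id_mapping current_table out) := by unfold Spec_update_foreign_keys; infer_instance

-- ===== CLAIM (what is proved, stated in full; the proofs are below) =====
def Claim_equal_update_foreign_keys : Prop := ∀ (row_data : List (String × Option Int)) (id_mapping : List (String × List (Int × Int))) (current_table : String), Dom_update_foreign_keys row_data id_mapping current_table → Pre_update_foreign_keys row_data id_mapping current_table → Spec_update_foreign_keys row_data id_mapping current_table (update_foreign_keys row_data id_mapping current_table)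

-- ===== LEMMAS AND PROOFS =====

-- proof-only: B's per-entry value with the pattern lookup already resolved
def remapCore (refOpt : Option String) (value : Option Int) (idm : PySem.Dict String (List (Int × Int))) : Option Int :=
  match value with
  | none => none
  | some x =>
    match refOpt with
    | none => some x
    | some ref =>
      match idm.get? ref with
      | none => some x
      | some table => some ((PySem.Dict.mk table).getD x x)

-- Source B's suffix-strip lookup coincides with A's pattern dict
lemma refTableOf_eq (k : String) : refTableOf k = (PySem.Dict.mk fkPatternsA).get? k := by
  have he : fkFieldSet =
      ["actor_id", "faction_id", "location_id", "race_id", "sub_race_id",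
       "parent_race_id", "class_id", "skill_id", "stat_id", "background_id",
       "alignment_id", "history_id", "object_id", "world_data_id", "arc_type_id"] := by decide
  by_cases h : fkFieldSet.contains k = true
  · have hm : k ∈ fkFieldSet := by simpa using h
    rw [he] at hm
    simp only [List.mem_cons, List.not_mem_nil, or_false] at hm
    rcases hm with rfl|rfl|rfl|rfl|rfl|rfl|rfl|rfl|rfl|rfl|rfl|rfl|rfl|rfl|rfl <;> decide
  · have h2 : (PySem.Dict.mk fkPatternsA).get? k = none := by
      rw [PySem.Dict.get?_eq_none_iff_not_mem_keys]
      intro hk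
      have hkeys : (PySem.Dict.mk fkPatternsA).keys = fkFieldSet := by decide
      rw [hkeys] at hk
      exact h (by simpa using hk)
    rw [h2]
    unfold refTableOf
    rw [if_neg h]

lemma bEntry_eq_core (idm : PySem.Dict String (List (Int × Int))) (k : String) (v : Option Int) :
    bEntry idm k v = remapCore ((PySem.Dict.mk fkPatternsA).get? k) v idm := by
  rw [← refTableOf_eq]
  cases v with
  | none => simp [bEntry, remapCore]
  | some x =>
    cases h : refTableOf k with
    | none => simp [bEntry, remapCore, h]
    | some t =>
      cases hg : idm.get? t with
      | none => simp [bEntry, remapCore, h, hg]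
      | some m => simp [bEntry, remapCore, h, hg]

lemma fkStep_keys_nodup (idm : PySem.Dict String (List (Int × Int))) (u : PySem.Dict String (Option Int))
    (p : String × String) (hu : u.keys.Nodup) : (fkStep idm u p).keys.Nodup := by
  unfold fkStep
  split
  · split
    · split
      · exact PySem.Dict.nodup_keys_insert _ _ _ hu
      · exact hu
    · exact hu
  · exact hu

lemma foldl_fkStep_items (idm : PySem.Dict String (List (Int × Int)))
    (ps : List (String × String)) (u : PySem.Dict String (Option Int))
    (hps : (ps.map Prod.fst).Nodup) (hu : u.keys.Nodup) :
    (ps.foldl (fkStep idm) u).items =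
      u.items.map (fun q => (q.1, remapCore ((PySem.Dict.mk ps).get? q.1) q.2 idm)) := by
  induction ps generalizing u with
  | nil =>
    rw [List.foldl_nil]
    have h : ∀ q ∈ u.items,
        (fun (q : String × Option Int) =>
          (q.1, remapCore ((PySem.Dict.mk ([] : List (String × String))).get? q.1) q.2 idm)) q
          = id q := by
      intro q _
      obtain ⟨k, v⟩ := q
      cases v <;> rfl
    rw [List.map_congr_left h, List.map_id]
  | cons p rest ih =>
    rw [List.map_cons] at hps
    have hp1 : p.1 ∉ rest.map Prod.fst := (List.nodup_cons.mp hps).1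
    have hrest : (rest.map Prod.fst).Nodup := (List.nodup_cons.mp hps).2
    have hmkrest : (PySem.Dict.mk rest).get? p.1 = none := by
      rw [PySem.Dict.get?_eq_none_iff_not_mem_keys]
      simpa [PySem.Dict.keys] using hp1
    have hget : ∀ q ∈ u.items, u.get? q.1 = some q.2 := by
      intro q hq
      obtain ⟨k, v⟩ := q
      exact PySem.Dict.get?_of_mem_items _ hq hu
    have hstep : (fkStep idm u p).items.map
          (fun q => (q.1, remapCore ((PySem.Dict.mk rest).get? q.1) q.2 idm)) =
        u.items.map (fun q => (q.1, remapCore ((PySem.Dict.mk (p :: rest)).get? q.1) q.2 idm)) := by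
      unfold fkStep
      rcases hgp : u.get? p.1 with _ | w
      · -- key p.1 absent from u: every item key differs from p.1
        dsimp only
        apply List.map_congr_left
        intro q hq
        have hkne : q.1 ≠ p.1 := by
          intro h
          rw [← h, hget q hq] at hgp
          simp at hgp
        rw [PySem.Dict.get?_mk_cons]
        simp [show (p.1 == q.1) = false from by simpa using fun h => hkne h.symm]
      · have hval : ∀ q ∈ u.items, q.1 = p.1 → q.2 = w := by
          intro q hq h
          have h2 := hget q hq
          rw [h, hgp] at h2
          exact (Option.some.injEq _ _).mp h2.symm
        cases w with
        | none =>
          dsimp only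
          apply List.map_congr_left
          intro q hq
          rw [PySem.Dict.get?_mk_cons]
          by_cases hk : p.1 = q.1
          · have hq2 : q.2 = none := hval q hq hk.symm
            simp [hq2, remapCore]
          · simp [show (p.1 == q.1) = false from by simpa using hk]
        | some x =>
          rcases him : idm.get? p.2 with _ | table
          · dsimp only
            apply List.map_congr_left
            intro q hq
            rw [PySem.Dict.get?_mk_cons]
            by_cases hk : p.1 = q.1
            · have hq2 : q.2 = some x := hval q hq hk.symm
              rw [← hk] at *
              simp [hq2, hmkrest, remapCore, him]
            · simp [show (p.1 == q.1) = false from by simpa using hk]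
          · rcases htab : (PySem.Dict.mk table).get? x with _ | nv
            · dsimp only
              rw [htab]
              apply List.map_congr_left
              intro q hq
              rw [PySem.Dict.get?_mk_cons]
              by_cases hk : p.1 = q.1
              · have hq2 : q.2 = some x := hval q hq hk.symm
                rw [← hk] at *
                simp [hq2, hmkrest, remapCore, him,
                  PySem.Dict.getD_eq_get?_getD, htab]
              · simp [show (p.1 == q.1) = false from by simpa using hk]
            · dsimp only
              rw [htab]
              have hcont : u.contains p.1 = true := by
                rw [PySem.Dict.contains_eq_isSome_get?, hgp]; rfl
              rw [PySem.Dict.items_insert_of_contains _ _ hcont, List.map_map]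
              apply List.map_congr_left
              intro q hq
              by_cases hk : q.1 = p.1
              · simp only [Function.comp, hk, beq_self_eq_true, if_pos]
                have hq2 : q.2 = some x := hval q hq hk
                have hcons : (PySem.Dict.mk (p :: rest)).get? p.1 = some p.2 := by
                  obtain ⟨pk, pv⟩ := p
                  simp [PySem.Dict.get?_mk_cons]
                simp [hq2, hcons, hmkrest, remapCore, him,
                  PySem.Dict.getD_eq_get?_getD, htab]
              · have hb : (q.1 == p.1) = false := by simpa using hk
                simp only [Function.comp, hb, Bool.false_eq_true, if_neg, not_false_iff]
                rw [PySem.Dict.get?_mk_cons]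
                simp [show (p.1 == q.1) = false from by simpa using fun h => hk h.symm]
    rw [List.foldl_cons, ih (fkStep idm u p) hrest (fkStep_keys_nodup idm u p hu), hstep]

-- B's dict-building loop over distinct fresh keys appends its entries in row order
lemma alt_items (row_data : List (String × Option Int)) (id_mapping : List (String × List (Int × Int)))
    (current_table : String) (hpre : (row_data.map Prod.fst).Nodup) :
    update_foreign_keys_alt row_data id_mapping current_table =
      row_data.map (fun kv => (kv.1, bEntry (PySem.Dict.mk id_mapping) kv.1 kv.2)) := by
  unfold update_foreign_keys_alt
  have h := PySem.Dict.items_foldl_insert_fresh row_data Prod.fst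
    (fun kv => bEntry (PySem.Dict.mk id_mapping) kv.1 kv.2) PySem.Dict.empty
    (fun kv _ => PySem.Dict.contains_empty kv.1) hpre
  simpa using h

-- ===== VERDICT (by name: the statement is the Claim_ definition above) =====
theorem update_foreign_keys_spec : Claim_equal_update_foreign_keys := by
  intro row_data id_mapping current_table _hdom hpre
  unfold Spec_update_foreign_keys update_foreign_keys
  have hu : (PySem.Dict.mk row_data).keys.Nodup := by
    simpa [PySem.Dict.keys] using hpre
  rw [foldl_fkStep_items _ fkPatternsA (PySem.Dict.mk row_data) (by decide) hu,
    alt_items row_data id_mapping current_table hpre]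
  have hitems : (PySem.Dict.mk row_data).items = row_data := rfl
  rw [hitems]
  apply List.map_congr_left
  intro q _
  rw [bEntry_eq_core]
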